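-- pv_equiv track=rewrite | github.com/hotteok00/Algorithm | 백준/Silver/1072. 게임/게임.py | find_min_games
-- ===== SOURCE A (Python) =====
-- def get_win_rate(x, y):
--     return y * 100 // x
--
-- def find_min_games(x, y):
--     initial_rate = get_win_rate(x, y)
--
--     if initial_rate >= 99:  # 승률이 99% 이상이면 승률을 올릴 수 없음
--         return -1
--
--     left, right = 0, 10**9
--     answer = -1
--
--     while left <= right:
--         mid = (left + right) // 2
--         new_x = x + mid
--         new_y = y + mid
--         new_rate = get_win_rate(new_x, new_y)
--
--         if new_rate > initial_rate:
--             answer = mid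
--             right = mid - 1
--         else:
--             left = mid + 1
--
--     return answer
-- ===== SOURCE B (Python) =====
-- def find_min_games(x, y):
--     initial_rate = y * 100 // x
--     if initial_rate >= 99:
--         return -1
--     target = initial_rate + 1
--     num = target * x - 100 * y
--     den = 100 - target
--     answer = -(-num // den)
--     return -1 if answer > 10**9 else answer
-- ===== Notes on version B (the rewrite author's own statement) =====
-- stated objective: faster
-- what changed: Replaces A's ~30-iteration binary search over [0, 10^9] with a closed-form ceiling division: answer = ceil(((initial_rate+1)*x - 100*y) / (99 - initial_rate)), keeping the initial-rate computation, the >=99 -> -1 case and the >10^9 -> -1 fallback.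
-- outside the precondition, e.g. on find_min_games(0, 5): A raises ZeroDivisionError, B raises ZeroDivisionError; on find_min_games(-5, 0): A raises ZeroDivisionError, B returns 0; on find_min_games(-1898048652, -1690417191): A returns -1, B returns -178265958
import Mathlib
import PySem

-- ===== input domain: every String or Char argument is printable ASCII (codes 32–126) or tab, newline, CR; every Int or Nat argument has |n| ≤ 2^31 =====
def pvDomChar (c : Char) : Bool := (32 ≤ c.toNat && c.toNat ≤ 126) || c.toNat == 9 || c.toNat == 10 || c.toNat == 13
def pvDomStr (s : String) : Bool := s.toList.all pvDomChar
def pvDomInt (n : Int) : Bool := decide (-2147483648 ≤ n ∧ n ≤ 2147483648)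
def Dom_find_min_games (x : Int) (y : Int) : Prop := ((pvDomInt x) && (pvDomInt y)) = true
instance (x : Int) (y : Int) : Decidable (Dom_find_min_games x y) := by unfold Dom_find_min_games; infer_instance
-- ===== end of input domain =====

-- B replaces A's binary search over [0, 10^9] by one closed-form ceiling division (same -1 fallback when the answer exceeds 10^9); objective: faster.

-- ===== PORT A =====
def get_win_rate (x : Int) (y : Int) : Int := PySem.Int.floordiv (y * 100) x

-- the while-loop of A, recursing on the shrinking interval [left, right]
def findLoopA (x y ir left right answer : Int) : Int :=
  if _h : left ≤ right then
    if get_win_rate (x + PySem.Int.floordiv (left + right) 2)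
         (y + PySem.Int.floordiv (left + right) 2) > ir then
      findLoopA x y ir left (PySem.Int.floordiv (left + right) 2 - 1)
        (PySem.Int.floordiv (left + right) 2)
    else
      findLoopA x y ir (PySem.Int.floordiv (left + right) 2 + 1) right answer
  else answer
termination_by (right + 1 - left).toNat
decreasing_by
  · have h2 := PySem.Int.floordiv_two_mid_bounds _h
    omega
  · have h2 := PySem.Int.floordiv_two_mid_bounds _h
    omega

def find_min_games (x : Int) (y : Int) : Int :=
  let initial_rate := get_win_rate x y
  if initial_rate ≥ 99 then -1
  else findLoopA x y initial_rate 0 (10 ^ 9) (-1)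

-- ===== PORT B =====
def find_min_games_alt (x : Int) (y : Int) : Int :=
  let initial_rate := PySem.Int.floordiv (y * 100) x
  if initial_rate ≥ 99 then -1
  else
    let target := initial_rate + 1
    let num := target * x - 100 * y
    let den := 100 - target
    let answer := -(PySem.Int.floordiv (-num) den)
    if answer > 10 ^ 9 then -1 else answer

-- ===== PRECONDITION & SPEC =====
-- Pre_ restricts to the problem's natural domain x ≥ 1 (games already played): for x = 0 A raises
-- ZeroDivisionError at once, and for x < 0 A either divides by zero inside the binary search or
-- returns a value computed from a meaningless "rate" with a negative divisor.
def Pre_find_min_games (x : Int) (_y : Int) : Prop := 1 ≤ x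
instance (x : Int) (y : Int) : Decidable (Pre_find_min_games x y) := by unfold Pre_find_min_games; infer_instance
def pvWitness_find_min_games : Int × Int := (10, 8)

def Spec_find_min_games (x : Int) (y : Int) (out : Int) : Prop := out = find_min_games_alt x y
instance (x : Int) (y : Int) (out : Int) : Decidable (Spec_find_min_games x y out) := by unfold Spec_find_min_games; infer_instance

-- ===== CLAIM (what is proved, stated in full; the proofs are below) =====
def Claim_equal_find_min_games : Prop := ∀ (x : Int) (y : Int), Dom_find_min_games x y → Pre_find_min_games x y → Spec_find_min_games x y (find_min_games x y)

-- ===== LEMMAS AND PROOFS =====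

-- Binary-search correctness: if "new_rate > ir" is exactly "q ≤ mid" for mid ≥ 0, the loop
-- computes the least element q of that upward-closed set (or -1 when q is beyond 10^9).
theorem findLoopA_spec (x y ir q : Int)
    (hq : ∀ m : Int, 0 ≤ m → (get_win_rate (x + m) (y + m) > ir ↔ q ≤ m))
    (hq1 : 1 ≤ q) :
    ∀ (l r ans : Int), 0 ≤ l → l ≤ q → r ≤ 10 ^ 9 →
      ((ans = -1 ∧ r = 10 ^ 9) ∨ (ans = r + 1 ∧ q ≤ ans ∧ ans ≤ 10 ^ 9)) →
      findLoopA x y ir l r ans = if q ≤ 10 ^ 9 then q else -1 := by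
  intro l r ans
  induction l, r, ans using findLoopA.induct x y ir with
  | case1 l r ans hlr htest ih =>
    intro hl0 hlq hr hinv
    have hmid := PySem.Int.floordiv_two_mid_bounds hlr
    rw [findLoopA]
    simp only [hlr, dite_true, htest, if_true]
    have hqm : q ≤ PySem.Int.floordiv (l + r) 2 := by
      exact (hq _ (by omega)).1 htest
    exact ih hl0 hlq (by omega) (by omega)
  | case2 l r ans hlr htest ih =>
    intro hl0 hlq hr hinv
    have hmid := PySem.Int.floordiv_two_mid_bounds hlr
    rw [findLoopA]
    simp only [hlr, dite_true, htest, if_false]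
    have hqm : ¬ q ≤ PySem.Int.floordiv (l + r) 2 := by
      intro hc
      exact htest ((hq _ (by omega)).2 hc)
    exact ih (by omega) (by omega) hr hinv
  | case3 l r ans hlr =>
    intro hl0 hlq hr hinv
    rw [findLoopA]
    simp only [hlr, dite_false]
    rcases hinv with ⟨rfl, rfl⟩ | ⟨rfl, hqa, ha⟩
    · have : ¬ q ≤ 10 ^ 9 := by omega
      rw [if_neg this]
    · have : q = r + 1 := by omega
      omega

theorem find_min_games_spec' (x y : Int) (hx : 1 ≤ x) :
    find_min_games x y = find_min_games_alt x y := by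
  unfold find_min_games find_min_games_alt get_win_rate
  set ir := PySem.Int.floordiv (y * 100) x with hir
  by_cases h99 : ir ≥ 99
  · simp [h99]
  · simp only [h99, if_false]
    -- floor-division bracket for the initial rate
    have hxpos : (0 : Int) < x := hx
    have hdm := PySem.Int.floordiv_mul_add_mod (y * 100) x
    have hm0 := PySem.Int.mod_nonneg (y * 100) hxpos
    have hml := PySem.Int.mod_lt (y * 100) hxpos
    have hbr : ir * x ≤ y * 100 ∧ y * 100 < (ir + 1) * x := by
      constructor <;> nlinarith [hdm, hm0, hml]
    set n := (ir + 1) * x - 100 * y with hn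
    set d := (100 : Int) - (ir + 1) with hd
    have hdpos : (0 : Int) < d := by omega
    have hnpos : (0 : Int) < n := by
      have := hbr.2; nlinarith
    set q := -(PySem.Int.floordiv (-n) d) with hqdef
    -- ceiling bracket: q ≤ m ↔ n ≤ m * d
    have hceil : ∀ m : Int, q ≤ m ↔ n ≤ m * d := by
      intro m
      have := (PySem.Int.neg_floordiv_neg_eq_iff_of_pos (a := n) (b := d) (q := q) hdpos).1 rfl
      constructor <;> intro hle <;> nlinarith [this.1, this.2]
    have hq1 : 1 ≤ q := by
      by_contra hc
      have hq0 : q ≤ 0 := by omega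
      have := (hceil 0).1 (by omega)
      omega
    have hq : ∀ m : Int, 0 ≤ m → (get_win_rate (x + m) (y + m) > ir ↔ q ≤ m) := by
      intro m hm
      unfold get_win_rate
      have hxm : (0 : Int) < x + m := by omega
      have h1 : (ir < PySem.Int.floordiv ((y + m) * 100) (x + m)) ↔
          ir + 1 ≤ PySem.Int.floordiv ((y + m) * 100) (x + m) := by omega
      rw [gt_iff_lt, h1, PySem.Int.le_floordiv_iff_mul_le hxm, hceil m]
      constructor <;> intro hle <;> nlinarith
    have hloop := findLoopA_spec x y ir q hq hq1 0 (10 ^ 9) (-1) (by norm_num)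
      (by omega) (by norm_num) (Or.inl ⟨rfl, rfl⟩)
    rw [hloop]
    by_cases hB : q > 10 ^ 9
    · rw [if_neg (by omega), if_pos hB]
    · rw [if_pos (by omega), if_neg hB]

-- ===== VERDICT (by name: the statement is the Claim_ definition above) =====
theorem find_min_games_spec : Claim_equal_find_min_games := by
  intro x y _hdom hpre
  exact find_min_games_spec' x y hpre
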